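-- pv_equiv track=rewrite | github.com/nad21lc/Complejidad-Algoritmica | practicapc1/D-divide-y-venceras.py | obtenerMultiplicacionElementos
-- ===== SOURCE A (Python) =====
-- def obtenerMultiplicacionElementos(arreglo, i, j):
--     if i==j:
--         return arreglo[i]
--     else:
--         mitad =(i+j) // 2 # // es para que salga entero
--         midIzq = obtenerMultiplicacionElementos(arreglo, i, mitad)
--         midDer = obtenerMultiplicacionElementos(arreglo, mitad+1, j)
--         return midIzq*midDer
-- ===== SOURCE B (Python) =====
-- def obtenerMultiplicacionElementos(arreglo, i, j):
--     resultado = arreglo[i]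
--     for k in range(i + 1, j + 1):
--         resultado *= arreglo[k]
--     return resultado
-- ===== Notes on version B (the rewrite author's own statement) =====
-- stated objective: simpler
-- what changed: Replaces the divide-and-conquer recursion that splits the inclusive range in halves with a single flat left-to-right loop multiplying into an accumulator initialized to arreglo[i].
import Mathlib
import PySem

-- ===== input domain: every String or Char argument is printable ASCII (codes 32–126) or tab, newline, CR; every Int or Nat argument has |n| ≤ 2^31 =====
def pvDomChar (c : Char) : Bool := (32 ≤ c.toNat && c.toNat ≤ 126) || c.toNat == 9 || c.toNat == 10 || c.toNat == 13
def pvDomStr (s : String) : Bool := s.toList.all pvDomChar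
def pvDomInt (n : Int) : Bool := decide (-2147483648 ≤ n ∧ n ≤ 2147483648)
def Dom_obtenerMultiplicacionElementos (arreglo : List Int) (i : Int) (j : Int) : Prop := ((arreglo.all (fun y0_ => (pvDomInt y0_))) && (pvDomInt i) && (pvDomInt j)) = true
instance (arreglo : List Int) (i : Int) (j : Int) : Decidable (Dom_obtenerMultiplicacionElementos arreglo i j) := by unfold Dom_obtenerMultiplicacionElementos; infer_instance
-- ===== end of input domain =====

-- B replaces the divide-and-conquer recursion by a single flat loop with an accumulator (objective: simpler).

-- ===== PORT A =====
-- Fuel-guarded transliteration of A's recursion (fuel only makes the recursion total;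
-- the wrapper supplies enough fuel for every input on which the Python returns).
def obtenerMultiplicacionElementosFuel (fuel : Nat) (arreglo : List Int) (i : Int) (j : Int) : Int :=
  match fuel with
  | 0 => 0
  | fuel + 1 =>
    if i = j then (PySem.List.pyGet? arreglo i).getD 0
    else
      let mitad := PySem.Int.floordiv (i + j) 2
      let midIzq := obtenerMultiplicacionElementosFuel fuel arreglo i mitad
      let midDer := obtenerMultiplicacionElementosFuel fuel arreglo (mitad + 1) j
      midIzq * midDer

def obtenerMultiplicacionElementos (arreglo : List Int) (i : Int) (j : Int) : Int :=
  obtenerMultiplicacionElementosFuel ((j - i).toNat + 1) arreglo i j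

-- ===== PORT B =====
def obtenerMultiplicacionElementos_alt (arreglo : List Int) (i : Int) (j : Int) : Int :=
  (PySem.List.pyRange (i + 1) (j + 1) 1).foldl
    (fun resultado k => resultado * (PySem.List.pyGet? arreglo k).getD 0)
    ((PySem.List.pyGet? arreglo i).getD 0)

-- ===== PRECONDITION & SPEC =====
-- Pre_ = exactly the inputs where the Python A returns: i ≤ j (otherwise the recursion
-- never terminates, RecursionError) and every index of the inclusive range i..j is a
-- valid Python index (possibly negative), i.e. -len ≤ i and j < len.
def Pre_obtenerMultiplicacionElementos (arreglo : List Int) (i : Int) (j : Int) : Prop :=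
  i ≤ j ∧ -(arreglo.length : Int) ≤ i ∧ j < (arreglo.length : Int)
instance (arreglo : List Int) (i : Int) (j : Int) : Decidable (Pre_obtenerMultiplicacionElementos arreglo i j) := by unfold Pre_obtenerMultiplicacionElementos; infer_instance

def pvWitness_obtenerMultiplicacionElementos : List Int × Int × Int := ([2, 3, 5, 7], 1, 3)

def Spec_obtenerMultiplicacionElementos (arreglo : List Int) (i : Int) (j : Int) (out : Int) : Prop := out = obtenerMultiplicacionElementos_alt arreglo i j
instance (arreglo : List Int) (i : Int) (j : Int) (out : Int) : Decidable (Spec_obtenerMultiplicacionElementos arreglo i j out) := by unfold Spec_obtenerMultiplicacionElementos; infer_instance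

-- ===== CLAIM (what is proved, stated in full; the proofs are below) =====
def Claim_equal_obtenerMultiplicacionElementos : Prop := ∀ (arreglo : List Int) (i : Int) (j : Int), Dom_obtenerMultiplicacionElementos arreglo i j → Pre_obtenerMultiplicacionElementos arreglo i j → Spec_obtenerMultiplicacionElementos arreglo i j (obtenerMultiplicacionElementos arreglo i j)

-- ===== LEMMAS AND PROOFS =====

-- Product of arreglo over the half-open index range [a, b).
def pvProd (arreglo : List Int) (a b : Int) : Int :=
  ((PySem.List.pyRange a b 1).map (fun k => (PySem.List.pyGet? arreglo k).getD 0)).prod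

theorem pvProd_split (arreglo : List Int) (a m b : Int) (h1 : a ≤ m) (h2 : m ≤ b) :
    pvProd arreglo a b = pvProd arreglo a m * pvProd arreglo m b := by
  unfold pvProd
  rw [PySem.List.pyRange_one_append a m b h1 h2, List.map_append, List.prod_append]

theorem fuel_eq_pvProd (fuel : Nat) (arreglo : List Int) (i j : Int)
    (hij : i ≤ j) (hf : (j - i).toNat < fuel) :
    obtenerMultiplicacionElementosFuel fuel arreglo i j = pvProd arreglo i (j + 1) := by
  induction fuel generalizing i j with
  | zero => omega
  | succ fuel ih =>
    by_cases h : i = j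
    · subst h
      simp [obtenerMultiplicacionElementosFuel, pvProd, PySem.List.pyRange_one_singleton]
    · have hlt : i < j := lt_of_le_of_ne hij h
      have hfd : PySem.Int.floordiv (i + j) 2 = (i + j) / 2 := by
        simp [PySem.Int.floordiv, Int.fdiv_eq_ediv]
      have hm1 : i ≤ (i + j) / 2 := by omega
      have hm2 : (i + j) / 2 < j := by omega
      rw [obtenerMultiplicacionElementosFuel]
      simp only [if_neg h, hfd]
      rw [ih i ((i + j) / 2) hm1 (by omega), ih ((i + j) / 2 + 1) j (by omega) (by omega)]
      rw [pvProd_split arreglo i ((i + j) / 2 + 1) (j + 1) (by omega) (by omega)]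

theorem foldl_mul_eq_prod (l : List Int) (f : Int → Int) (init : Int) :
    l.foldl (fun acc k => acc * f k) init = init * (l.map f).prod := by
  induction l generalizing init with
  | nil => simp
  | cons x xs ih => simp [List.foldl_cons, ih, mul_assoc]

theorem alt_eq_pvProd (arreglo : List Int) (i j : Int) (hij : i ≤ j) :
    obtenerMultiplicacionElementos_alt arreglo i j = pvProd arreglo i (j + 1) := by
  unfold obtenerMultiplicacionElementos_alt pvProd
  rw [foldl_mul_eq_prod, PySem.List.pyRange_one_cons (by omega : i < j + 1), List.map_cons,
    List.prod_cons]

-- ===== VERDICT (by name: the statement is the Claim_ definition above) =====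
theorem obtenerMultiplicacionElementos_spec : Claim_equal_obtenerMultiplicacionElementos := by
  intro arreglo i j _ hpre
  obtain ⟨hij, -, -⟩ := hpre
  unfold Spec_obtenerMultiplicacionElementos obtenerMultiplicacionElementos
  rw [fuel_eq_pvProd _ _ _ _ hij (by omega), alt_eq_pvProd _ _ _ hij]
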